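-- pv_equiv track=rewrite | github.com/Qiskit/qiskit-addon-cutting | qiskit_addon_cutting/utils/transforms.py | _qubit_map_from_partition_labels
-- ===== SOURCE A (Python) =====
-- from collections import defaultdict
-- from collections.abc import Sequence, Iterable, Hashable, MutableMapping
--
-- def _qubit_map_from_partition_labels(
--     partition_labels: Sequence[Hashable],
-- ) -> tuple[list[tuple[Hashable, int] | tuple[None, None]], dict[Hashable, list[int]]]:
--     """Generate a qubit map given a qubit partitioning."""
--     qubit_map: list[tuple[Hashable, int] | tuple[None, None]] = []
--     qubits_by_subsystem: MutableMapping[Hashable, list[int]] = defaultdict(list)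
--     for i, qubit_label in enumerate(partition_labels):
--         if qubit_label is None:
--             qubit_map.append((None, None))
--         else:
--             current_label_qubits = qubits_by_subsystem[qubit_label]
--             qubit_map.append((qubit_label, len(current_label_qubits)))
--             current_label_qubits.append(i)
--     return qubit_map, dict(qubits_by_subsystem)
-- ===== SOURCE B (Python) =====
-- from collections import defaultdict
--
--
-- def _qubit_map_from_partition_labels(partition_labels):
--     """Generate a qubit map given a qubit partitioning (two-pass version)."""
--     qubit_map = [(None, None)] * len(partition_labels)
--     qubits_by_subsystem = defaultdict(list)
--     for i, label in enumerate(partition_labels):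
--         if label is not None:
--             qubits_by_subsystem[label].append(i)
--     for label, indices in qubits_by_subsystem.items():
--         for pos, i in enumerate(indices):
--             qubit_map[i] = (label, pos)
--     return qubit_map, dict(qubits_by_subsystem)
-- ===== Notes on version B (the rewrite author's own statement) =====
-- stated objective: alternative
-- what changed: B builds only the label groups in the first pass and derives each qubit's intra-subsystem position in a second pass by enumerating the finished groups and writing (label, pos) back into a pre-sized list, instead of reading a running group length while appending during a single pass.
import Mathlib
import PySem

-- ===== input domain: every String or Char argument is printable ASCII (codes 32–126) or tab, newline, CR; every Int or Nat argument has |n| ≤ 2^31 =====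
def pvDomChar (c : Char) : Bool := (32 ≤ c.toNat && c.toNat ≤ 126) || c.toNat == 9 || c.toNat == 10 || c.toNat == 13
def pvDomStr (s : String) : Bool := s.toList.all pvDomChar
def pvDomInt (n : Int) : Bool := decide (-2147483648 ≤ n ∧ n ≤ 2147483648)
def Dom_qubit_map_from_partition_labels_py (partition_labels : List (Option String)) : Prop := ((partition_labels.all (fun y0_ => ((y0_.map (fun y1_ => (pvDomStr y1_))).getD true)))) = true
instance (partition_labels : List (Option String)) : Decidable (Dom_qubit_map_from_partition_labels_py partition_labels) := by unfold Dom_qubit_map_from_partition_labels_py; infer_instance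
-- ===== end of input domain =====

-- B builds the label groups first and derives each qubit's intra-subsystem position in a second
-- pass over the finished groups (writing into a pre-sized list), instead of reading running group
-- lengths during a single pass; same O(n) cost, different decomposition.


-- ===== PORT A =====
-- Literal port of A: one pass; the running dict is read (current group length) and extended at
-- each labelled qubit.  defaultdict append = Dict.modify with default [].
def qubit_map_from_partition_labels_py (partition_labels : List (Option String)) :
    (List (Option String × Option Int)) × (List (String × List Int)) :=
  let st :=
    (PySem.List.enumerate partition_labels).foldl
      (fun (st : List (Option String × Option Int) × PySem.Dict String (List Int)) p =>
        match p.2 with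
        | none => (st.1 ++ [(none, none)], st.2)
        | some l =>
          let cur := st.2.getD l []
          (st.1 ++ [(some l, some (cur.length : Int))], st.2.modify l [] (· ++ [p.1])))
      (([] : List (Option String × Option Int)), (PySem.Dict.empty : PySem.Dict String (List Int)))
  (st.1, st.2.items)

-- ===== PORT B =====
-- Literal port of B (Source B): pass 1 groups indices by label; pass 2 enumerates each finished group
-- and writes (label, pos) back at index i.  The written index i is a nonnegative enumerate index,
-- so `.toNat` is exact for Python's `qubit_map[i] = …`.
def qubit_map_from_partition_labels_py_alt (partition_labels : List (Option String)) :
    (List (Option String × Option Int)) × (List (String × List Int)) :=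
  let groups :=
    (PySem.List.enumerate partition_labels).foldl
      (fun (d : PySem.Dict String (List Int)) p =>
        match p.2 with
        | none => d
        | some l => d.modify l [] (· ++ [p.1]))
      PySem.Dict.empty
  let qm0 := List.replicate partition_labels.length ((none : Option String), (none : Option Int))
  let qm :=
    groups.items.foldl
      (fun qm g =>
        (PySem.List.enumerate g.2).foldl
          (fun qm pi => qm.set pi.2.toNat (some g.1, some pi.1)) qm)
      qm0
  (qm, groups.items)

-- ===== PRECONDITION & SPEC =====
def Spec_qubit_map_from_partition_labels_py (partition_labels : List (Option String)) (out : (List (Option String × Option Int)) × (List (String × List Int))) : Prop := out = qubit_map_from_partition_labels_py_alt partition_labels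
instance (partition_labels : List (Option String)) (out : (List (Option String × Option Int)) × (List (String × List Int))) : Decidable (Spec_qubit_map_from_partition_labels_py partition_labels out) := by unfold Spec_qubit_map_from_partition_labels_py; infer_instance

-- ===== CLAIM (what is proved, stated in full; the proofs are below) =====
def Claim_equal_qubit_map_from_partition_labels_py : Prop := ∀ (partition_labels : List (Option String)), Dom_qubit_map_from_partition_labels_py partition_labels → Spec_qubit_map_from_partition_labels_py partition_labels (qubit_map_from_partition_labels_py partition_labels)

-- ===== LEMMAS AND PROOFS =====

-- A's qubit_map, written as a recursion that carries the running dict.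
def pvAgo (ps : List (Int × Option String)) (d : PySem.Dict String (List Int)) :
    List (Option String × Option Int) :=
  match ps with
  | [] => []
  | p :: rest =>
    match p.2 with
    | none => (none, none) :: pvAgo rest d
    | some l =>
      (some l, some (((d.getD l []).length : Int))) :: pvAgo rest (d.modify l [] (· ++ [p.1]))

-- the (label, index) pairs of the labelled positions, in scan order
def pvPairsOf (ps : List (Int × Option String)) : List (String × Int) :=
  ps.filterMap (fun p => p.2.map (fun l => (l, p.1)))

-- the indices carrying label l, in increasing order, starting the enumeration at s
def pvJ (xs : List (Option String)) (s : Int) (l : String) : List Int :=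
  ((PySem.List.enumerate xs s).filter (fun p => p.2 == some l)).map (·.1)

-- the value both qubit_maps hold at position k
def pvSpecGet (xs : List (Option String)) (k : Nat) : Option (Option String × Option Int) :=
  (xs[k]?).map (fun ol =>
    match ol with
    | none => ((none : Option String), (none : Option Int))
    | some l => (some l, some (((xs.take k).count (some l) : Nat) : Int)))

-- the flattened write list of B's second pass
def pvWrites (items : List (String × List Int)) : List (Nat × (Option String × Option Int)) :=
  items.flatMap (fun g => (PySem.List.enumerate g.2).map (fun pi => (pi.2.toNat, (some g.1, some pi.1))))

lemma pvGetD_modify (d : PySem.Dict String (List Int)) (k k' : String) (f : List Int → List Int) :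
    (d.modify k [] f).getD k' [] = if k' = k then f (d.getD k []) else d.getD k' [] := by
  have h : d.modify k [] f = d.insert k (f (d.getD k [])) := rfl
  rw [h, PySem.Dict.getD_insert]

lemma pvAfold_eq (ps : List (Int × Option String)) (a : List (Option String × Option Int))
    (d : PySem.Dict String (List Int)) :
    ps.foldl
      (fun (st : List (Option String × Option Int) × PySem.Dict String (List Int)) p =>
        match p.2 with
        | none => (st.1 ++ [(none, none)], st.2)
        | some l =>
          let cur := st.2.getD l []
          (st.1 ++ [(some l, some (cur.length : Int))], st.2.modify l [] (· ++ [p.1])))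
      (a, d)
    = (a ++ pvAgo ps d,
       ps.foldl
         (fun (d : PySem.Dict String (List Int)) p =>
           match p.2 with
           | none => d
           | some l => d.modify l [] (· ++ [p.1]))
         d) := by
  induction ps generalizing a d with
  | nil => simp [pvAgo]
  | cons p rest ih =>
    obtain ⟨i, ol⟩ := p
    cases ol with
    | none => simp [pvAgo, ih]
    | some l => simp [pvAgo, ih]


lemma pvAgo_getElem? (ps : List (Int × Option String)) (d : PySem.Dict String (List Int)) (k : Nat) :
    (pvAgo ps d)[k]? = (ps[k]?).map (fun p =>
      match p.2 with
      | none => ((none : Option String), (none : Option Int))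
      | some l => (some l, some ((((d.getD l []).length + ((ps.take k).map Prod.snd).count (some l) : Nat)) : Int))) := by
  induction ps generalizing d k with
  | nil => simp [pvAgo]
  | cons p rest ih =>
    obtain ⟨i, ol⟩ := p
    cases ol with
    | none =>
      cases k with
      | zero => simp [pvAgo]
      | succ k =>
        simp only [pvAgo, List.getElem?_cons_succ, List.take_succ_cons, List.map_cons,
          List.count_cons, ih]
        cases h : rest[k]? with
        | none => simp
        | some q =>
          obtain ⟨j, ol'⟩ := q
          cases ol' <;> simp
    | some l =>
      cases k with
      | zero => simp [pvAgo]
      | succ k =>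
        simp only [pvAgo, List.getElem?_cons_succ, List.take_succ_cons, List.map_cons,
          List.count_cons, ih]
        cases h : rest[k]? with
        | none => simp
        | some q =>
          obtain ⟨j, ol'⟩ := q
          cases ol' with
          | none => simp
          | some m =>
            simp only [Option.map_some]
            by_cases hml : m = l
            · subst hml
              simp
              omega
            · simp [pvGetD_modify, hml]
              exact fun h' => hml h'.symm

lemma pvDfold_eq (ps : List (Int × Option String)) (d : PySem.Dict String (List Int)) :
    ps.foldl
      (fun (d : PySem.Dict String (List Int)) p =>
        match p.2 with
        | none => d
        | some l => d.modify l [] (· ++ [p.1]))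
      d
    = (pvPairsOf ps).foldl (fun d p => d.modify p.1 [] (fun x => x ++ [p.2])) d := by
  induction ps generalizing d with
  | nil => simp [pvPairsOf]
  | cons p rest ih =>
    obtain ⟨i, ol⟩ := p
    cases ol <;> simp [pvPairsOf, ih]

lemma pvPairs_filter (xs : List (Option String)) (s : Int) (l : String) :
    ((pvPairsOf (PySem.List.enumerate xs s)).filter (fun p => p.1 == l)).map (fun x => x.2)
      = pvJ xs s l := by
  induction xs generalizing s with
  | nil => simp [pvPairsOf, pvJ, PySem.List.enumerate_nil]
  | cons x rest ih =>
    cases x with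
    | none =>
      simp [pvPairsOf, pvJ, PySem.List.enumerate_cons]
      simpa [pvPairsOf, pvJ] using ih (s + 1)
    | some m =>
      by_cases hml : m = l
      · subst hml
        simp [pvPairsOf, pvJ, PySem.List.enumerate_cons]
        simpa [pvPairsOf, pvJ] using ih (s + 1)
      · simp [pvPairsOf, pvJ, PySem.List.enumerate_cons, hml]
        simpa [pvPairsOf, pvJ] using ih (s + 1)

lemma pvGetD_groups (xs : List (Option String)) (l : String) :
    ((PySem.List.enumerate xs).foldl
      (fun (d : PySem.Dict String (List Int)) p =>
        match p.2 with
        | none => d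
        | some l => d.modify l [] (· ++ [p.1]))
      PySem.Dict.empty).getD l [] = pvJ xs 0 l := by
  rw [pvDfold_eq, PySem.Dict.getD_foldl_modify_append, PySem.Dict.getD_empty]
  simpa using pvPairs_filter xs 0 l

lemma pvJ_getElem? (xs : List (Option String)) (s : Int) (l : String) (p : Nat) (i : Int)
    (h : (pvJ xs s l)[p]? = some i) :
    ∃ j : Nat, j < xs.length ∧ i = s + j ∧ xs[j]? = some (some l) ∧
      (xs.take j).count (some l) = p := by
  induction xs generalizing s p with
  | nil => simp [pvJ, PySem.List.enumerate_nil] at h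
  | cons x rest ih =>
    cases x with
    | none =>
      rw [pvJ, PySem.List.enumerate_cons, List.filter_cons_of_neg (by simp)] at h
      obtain ⟨j, hj, hi, hget, hcnt⟩ := ih (s + 1) p h
      exact ⟨j + 1, by simp only [List.length_cons]; omega, by push_cast; omega, by simpa using hget, by simpa using hcnt⟩
    | some m =>
      by_cases hml : m = l
      · subst hml
        rw [pvJ, PySem.List.enumerate_cons, List.filter_cons_of_pos (by simp)] at h
        rw [List.map_cons] at h
        cases p with
        | zero =>
          simp at h
          exact ⟨0, by simp, by push_cast; omega, by simp, by simp⟩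
        | succ p =>
          rw [List.getElem?_cons_succ] at h
          obtain ⟨j, hj, hi, hget, hcnt⟩ := ih (s + 1) p h
          exact ⟨j + 1, by simp only [List.length_cons]; omega, by push_cast; omega, by simpa using hget, by simp [hcnt]⟩
      · rw [pvJ, PySem.List.enumerate_cons, List.filter_cons_of_neg (by simp [hml])] at h
        obtain ⟨j, hj, hi, hget, hcnt⟩ := ih (s + 1) p h
        refine ⟨j + 1, by simp only [List.length_cons]; omega, by push_cast; omega, by simpa using hget, ?_⟩
        rw [List.take_succ_cons, List.count_cons_of_ne (by intro heq; injection heq with h2; exact hml h2)]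
        exact hcnt

lemma pvJ_complete (xs : List (Option String)) (s : Int) (l : String) (j : Nat)
    (h : xs[j]? = some (some l)) :
    (pvJ xs s l)[(xs.take j).count (some l)]? = some (s + j) := by
  induction xs generalizing s j with
  | nil => simp at h
  | cons x rest ih =>
    cases j with
    | zero =>
      simp at h
      subst h
      simp [pvJ, PySem.List.enumerate_cons]
    | succ j =>
      rw [List.getElem?_cons_succ] at h
      have hc : (s : Int) + ((j : Nat) + 1 : Nat) = (s + 1) + (j : Int) := by push_cast; ring
      cases x with
      | none =>
        rw [pvJ, PySem.List.enumerate_cons, List.filter_cons_of_neg (by simp),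
          List.take_succ_cons, List.count_cons_of_ne (by simp), hc]
        exact ih (s + 1) j h
      | some m =>
        by_cases hml : m = l
        · subst hml
          rw [pvJ, PySem.List.enumerate_cons, List.filter_cons_of_pos (by simp),
            List.take_succ_cons, List.count_cons_self, List.map_cons, List.getElem?_cons_succ, hc]
          exact ih (s + 1) j h
        · rw [pvJ, PySem.List.enumerate_cons, List.filter_cons_of_neg (by simp [hml]),
            List.take_succ_cons, List.count_cons_of_ne (by intro heq; injection heq with h2; exact hml h2), hc]
          exact ih (s + 1) j h

lemma pvKeys_modify (d : PySem.Dict String (List Int)) (k : String) (f : List Int → List Int) :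
    (d.modify k [] f).keys = if d.contains k then d.keys else d.keys ++ [k] := by
  have h : d.modify k [] f = d.insert k (f (d.getD k [])) := rfl
  rw [h]
  have hk : ∀ (v : List Int), (d.insert k v).keys = if d.contains k then d.keys else d.keys ++ [k] := by
    intro v
    show (d.insert k v).items.map Prod.fst = _
    rw [PySem.Dict.items_insert]
    by_cases hc : d.contains k
    · simp only [hc, if_true, List.map_map]
      have : ∀ p ∈ d.items, (Prod.fst ∘ fun p => if (p.1 == k) = true then (k, v) else p) p = Prod.fst p := by
        intro p _
        by_cases h1 : p.1 = k
        · simp [h1]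
        · simp [h1]
      rw [List.map_congr_left this]
      rfl
    · simp only [hc]
      simp
      rfl
  exact hk _

lemma pvNodup_keys_fold (qs : List (String × Int)) (d : PySem.Dict String (List Int))
    (h : d.keys.Nodup) :
    ((qs.foldl (fun d p => d.modify p.1 [] (fun x => x ++ [p.2])) d)).keys.Nodup := by
  induction qs generalizing d with
  | nil => simpa
  | cons q rest ih =>
    simp only [List.foldl_cons]
    apply ih
    rw [pvKeys_modify]
    by_cases hc : (d.contains q.1 : Bool)
    · simpa [hc]
    · simp only [hc]
      refine List.Nodup.append h (by simp) ?_
      intro a ha hb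
      simp at hb
      subst hb
      have : d.contains q.1 = true := by
        rw [PySem.Dict.contains_eq_decide_mem_keys]
        simpa using ha
      simp [this] at hc

lemma pvNodup_groups_keys (xs : List (Option String)) :
    ((PySem.List.enumerate xs).foldl
      (fun (d : PySem.Dict String (List Int)) p =>
        match p.2 with
        | none => d
        | some l => d.modify l [] (· ++ [p.1]))
      PySem.Dict.empty).keys.Nodup := by
  rw [pvDfold_eq]
  exact pvNodup_keys_fold _ _ (by simp [PySem.Dict.keys_empty])


lemma pvScatter_get (F : Nat → Option (Option String × Option Int))
    (ws : List (Nat × (Option String × Option Int)))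
    (qm : List (Option String × Option Int))
    (hcons : ∀ w ∈ ws, F w.1 = some w.2) (k : Nat) :
    (ws.foldl (fun q w => q.set w.1 w.2) qm)[k]? =
      if k ∈ ws.map Prod.fst ∧ k < qm.length then F k else qm[k]? := by
  induction ws generalizing qm with
  | nil => simp
  | cons w rest ih =>
    simp only [List.foldl_cons]
    rw [ih _ (fun w hw => hcons w (List.mem_cons_of_mem _ hw))]
    by_cases hmem : k ∈ rest.map Prod.fst
    · by_cases hk : k < qm.length
      · rw [if_pos ⟨hmem, by simpa using hk⟩, if_pos ⟨by simp [hmem], hk⟩]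
      · rw [if_neg (by rintro ⟨-, h⟩; simp only [List.length_set] at h; exact hk h),
            if_neg (by rintro ⟨-, h⟩; exact hk h)]
        rw [List.getElem?_set]
        split_ifs with h1 h2
        · omega
        · exact (List.getElem?_eq_none (by omega)).symm
        · rfl
    · rw [if_neg (by rintro ⟨h, -⟩; exact hmem h)]
      rw [List.getElem?_set]
      by_cases hwk : w.1 = k
      · subst hwk
        by_cases hk : w.1 < qm.length
        · rw [if_pos rfl, if_pos hk, if_pos ⟨by simp, hk⟩]
          exact (hcons w (by simp)).symm
        · rw [if_pos rfl, if_neg hk, if_neg (by rintro ⟨-, h⟩; exact hk h)]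
          exact (List.getElem?_eq_none (by omega)).symm
      · rw [if_neg hwk,
            if_neg (by rintro ⟨h1, -⟩; simp only [List.map_cons, List.mem_cons] at h1
                       rcases h1 with h1 | h1
                       · exact hwk h1.symm
                       · exact hmem h1)]

lemma pvNested_eq (items : List (String × List Int)) (qm0 : List (Option String × Option Int)) :
    items.foldl
      (fun qm g =>
        (PySem.List.enumerate g.2).foldl
          (fun qm pi => qm.set pi.2.toNat (some g.1, some pi.1)) qm)
      qm0
    = (pvWrites items).foldl (fun q w => q.set w.1 w.2) qm0 := by
  induction items generalizing qm0 with
  | nil => rfl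
  | cons g rest ih =>
    simp only [List.foldl_cons, pvWrites, List.flatMap_cons, List.foldl_append, List.foldl_map]
    rw [ih]
    rfl

lemma pvA_getElem? (xs : List (Option String)) (k : Nat) :
    (qubit_map_from_partition_labels_py xs).1[k]? = pvSpecGet xs k := by
  simp only [qubit_map_from_partition_labels_py]
  rw [pvAfold_eq, List.nil_append, pvAgo_getElem?, PySem.List.getElem?_enumerate]
  rw [List.map_take, PySem.List.map_snd_enumerate]
  unfold pvSpecGet
  cases h : xs[k]? with
  | none => simp
  | some ol =>
    cases ol with
    | none => simp
    | some l => simp [PySem.Dict.getD_empty]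

def pvGroupsOf (xs : List (Option String)) : PySem.Dict String (List Int) :=
  (PySem.List.enumerate xs).foldl
    (fun (d : PySem.Dict String (List Int)) p =>
      match p.2 with
      | none => d
      | some l => d.modify l [] (· ++ [p.1]))
    PySem.Dict.empty

lemma pvItems_val (xs : List (Option String)) :
    ∀ g ∈ (pvGroupsOf xs).items, g.2 = pvJ xs 0 g.1 := by
  rintro ⟨gl, gv⟩ hg
  have h1 := PySem.Dict.getD_of_mem_items _ hg (pvNodup_groups_keys xs) []
  rw [show (pvGroupsOf xs).getD gl [] = pvJ xs 0 gl from pvGetD_groups xs gl] at h1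
  exact h1.symm

lemma pvMem_items (xs : List (Option String)) (l : String) (h : pvJ xs 0 l ≠ []) :
    (l, pvJ xs 0 l) ∈ (pvGroupsOf xs).items := by
  cases hq : (pvGroupsOf xs).get? l with
  | none =>
    exfalso
    apply h
    have h0 : (pvGroupsOf xs).getD l [] = [] := by
      show ((pvGroupsOf xs).get? l).getD [] = []
      rw [hq]
      rfl
    rwa [show (pvGroupsOf xs).getD l [] = pvJ xs 0 l from pvGetD_groups xs l] at h0
  | some v =>
    have hv : (pvGroupsOf xs).getD l [] = v := by
      show ((pvGroupsOf xs).get? l).getD [] = v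
      rw [hq]
      rfl
    rw [show (pvGroupsOf xs).getD l [] = pvJ xs 0 l from pvGetD_groups xs l] at hv
    have hm := PySem.Dict.mem_items_of_get?_eq_some _ hq
    rwa [← hv] at hm

lemma pvConsistent (xs : List (Option String)) :
    ∀ w ∈ pvWrites (pvGroupsOf xs).items, pvSpecGet xs w.1 = some w.2 := by
  intro w hw
  rw [pvWrites, List.mem_flatMap] at hw
  obtain ⟨g, hg, hw⟩ := hw
  rw [List.mem_map] at hw
  obtain ⟨pi, hpi, rfl⟩ := hw
  rw [PySem.List.mem_enumerate_iff] at hpi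
  obtain ⟨p, hp, rfl⟩ := hpi
  have hval : g.2 = pvJ xs 0 g.1 := pvItems_val xs g hg
  have hj : (pvJ xs 0 g.1)[p]? = some (g.2[p]) := by
    rw [← hval]
    exact List.getElem?_eq_getElem hp
  obtain ⟨j, hjlen, hji, hjget, hjcnt⟩ := pvJ_getElem? xs 0 g.1 p _ hj
  have h2 : g.2[p] = (j : Int) := by rw [hji]; ring
  simp only [pvSpecGet, h2, Int.toNat_natCast, hjget, Option.map_some]
  rw [← hjcnt]
  simp

lemma pvWrites_shape (items : List (String × List Int)) :
    ∀ w ∈ pvWrites items, ∃ l c, w.2 = (some l, some c) := by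
  intro w hw
  rw [pvWrites, List.mem_flatMap] at hw
  obtain ⟨g, -, hw⟩ := hw
  rw [List.mem_map] at hw
  obtain ⟨pi, -, rfl⟩ := hw
  exact ⟨g.1, pi.1, rfl⟩

lemma pvCoverage (xs : List (Option String)) (l : String) (k : Nat)
    (h : xs[k]? = some (some l)) :
    k ∈ (pvWrites (pvGroupsOf xs).items).map Prod.fst := by
  have hc := pvJ_complete xs 0 l k h
  have hne : pvJ xs 0 l ≠ [] := by
    intro h0
    rw [h0] at hc
    simp at hc
  obtain ⟨hlt, hval⟩ := List.getElem?_eq_some_iff.mp hc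
  refine List.mem_map.mpr
    ⟨(((pvJ xs 0 l)[(xs.take k).count (some l)]'hlt).toNat,
      (some l, some ((0 : Int) + ((xs.take k).count (some l) : Int)))), ?_, ?_⟩
  · rw [pvWrites, List.mem_flatMap]
    refine ⟨(l, pvJ xs 0 l), pvMem_items xs l hne, ?_⟩
    exact List.mem_map.mpr
      ⟨((0 : Int) + ((xs.take k).count (some l) : Int), (pvJ xs 0 l)[(xs.take k).count (some l)]'hlt),
       (PySem.List.mem_enumerate_iff _ _ _).mpr ⟨(xs.take k).count (some l), hlt, rfl⟩, rfl⟩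
  · rw [hval]
    simp

lemma pvB_getElem? (xs : List (Option String)) (k : Nat) :
    (qubit_map_from_partition_labels_py_alt xs).1[k]? = pvSpecGet xs k := by
  have hB : (qubit_map_from_partition_labels_py_alt xs).1 =
      (pvWrites (pvGroupsOf xs).items).foldl (fun q w => q.set w.1 w.2)
        (List.replicate xs.length ((none : Option String), (none : Option Int))) := by
    simp only [qubit_map_from_partition_labels_py_alt]
    rw [pvNested_eq]
    rfl
  rw [hB, pvScatter_get (pvSpecGet xs) _ _ (pvConsistent xs) k]
  by_cases hk : k < xs.length
  · have hx : ∃ ol, xs[k]? = some ol := ⟨xs[k], List.getElem?_eq_getElem hk⟩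
    obtain ⟨ol, hol⟩ := hx
    cases ol with
    | some l =>
      rw [if_pos ⟨pvCoverage xs l k hol, by simpa using hk⟩]
    | none =>
      rw [if_neg ?_, List.getElem?_replicate, if_pos hk]
      · simp [pvSpecGet, hol]
      · rintro ⟨hmem, -⟩
        rw [List.mem_map] at hmem
        obtain ⟨w, hw, hwk⟩ := hmem
        have h1 := pvConsistent xs w hw
        obtain ⟨l', c', hsh⟩ := pvWrites_shape _ w hw
        rw [hwk] at h1
        rw [pvSpecGet, hol] at h1
        simp only [Option.map_some, Option.some.injEq] at h1
        rw [hsh] at h1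
        simp at h1
  · rw [if_neg (by rintro ⟨-, hlen⟩; simp at hlen; omega), List.getElem?_replicate,
      if_neg hk]
    simp [pvSpecGet, List.getElem?_eq_none (by omega : xs.length ≤ k)]


lemma pvSnd_eq (xs : List (Option String)) :
    (qubit_map_from_partition_labels_py xs).2 = (qubit_map_from_partition_labels_py_alt xs).2 := by
  simp only [qubit_map_from_partition_labels_py, qubit_map_from_partition_labels_py_alt]
  rw [pvAfold_eq]

-- ===== VERDICT (by name: the statement is the Claim_ definition above) =====
theorem qubit_map_from_partition_labels_py_spec : Claim_equal_qubit_map_from_partition_labels_py := by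
  intro xs _
  unfold Spec_qubit_map_from_partition_labels_py
  refine Prod.ext ?_ (pvSnd_eq xs)
  apply List.ext_getElem?
  intro k
  rw [pvA_getElem?, pvB_getElem?]
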